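-- pv_equiv track=rewrite | github.com/rmodi6/scripts | practice/Goldman Sachs/hr_maximal_commonality.py | maxLCS
-- ===== SOURCE A (Python) =====
-- def maxLCS(s):
--     # Write your code here
--     ans = 0
--     left_map = {}
--     right_map = {}
--     for ch in s:
--         if ch not in right_map:
--             right_map[ch] = 0
--         right_map[ch] += 1
--     for cut_index in range(len(s)):
--         common_characters = set(left_map.keys()).intersection(set(right_map.keys()))
--         max_common = 0
--         for cch in common_characters:
--             max_common += min(left_map[cch], right_map[cch])
--         ans = max(ans, max_common)
--         max_possible_ans = min(cut_index, len(s) - cut_index) + 1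
--         if ans >= max_possible_ans:
--             break
--         ch_to_swap = s[cut_index]
--         if ch_to_swap not in left_map:
--             left_map[ch_to_swap] = 0
--         left_map[ch_to_swap] += 1
--         right_map[ch_to_swap] -= 1
--         if right_map[ch_to_swap] == 0:
--             right_map.pop(ch_to_swap)
--     return ans
-- ===== SOURCE B (Python) =====
-- def maxLCS(s):
--     left = {}
--     right = {}
--     for ch in s:
--         right[ch] = right.get(ch, 0) + 1
--     common = 0
--     ans = 0
--     for ch in s:
--         l = left.get(ch, 0)
--         r = right[ch]
--         common += min(l + 1, r - 1) - min(l, r)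
--         left[ch] = l + 1
--         right[ch] = r - 1
--         ans = max(ans, common)
--     return ans
-- ===== Notes on version B (the rewrite author's own statement) =====
-- stated objective: faster
-- what changed: B replaces A's per-cut recomputation of the whole common-character sum (set intersection plus a scan over the alphabet at every cut) by a single left-to-right pass that updates a running common count with only the moved character's change of min-contribution.
import Mathlib
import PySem

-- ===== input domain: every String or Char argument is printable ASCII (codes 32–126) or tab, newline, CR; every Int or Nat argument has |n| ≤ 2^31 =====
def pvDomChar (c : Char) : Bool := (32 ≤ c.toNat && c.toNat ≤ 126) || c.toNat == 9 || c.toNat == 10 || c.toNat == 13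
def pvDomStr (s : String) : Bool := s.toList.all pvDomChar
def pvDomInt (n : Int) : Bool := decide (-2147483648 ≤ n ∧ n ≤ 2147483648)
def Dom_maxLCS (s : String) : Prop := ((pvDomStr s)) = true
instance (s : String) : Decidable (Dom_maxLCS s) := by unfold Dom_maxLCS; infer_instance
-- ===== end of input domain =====

-- B computes the same maximum over cut points in one pass, updating a running
-- common-count by the moved character's change of min-contribution (objective: faster).

-- ===== PORT A =====
-- A's main loop: 'for cut_index in range(len(s))' with an early break; ported as
-- structural recursion on the remaining suffix 'rest' (so s[cut_index] is rest's head),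
-- with 'cut' the current cut_index and 'n' = len(s).
def maxLCSGoA (n : Int) (rest : List Char) (cut : Nat)
    (lm rm : PySem.Dict Char Int) (ans : Int) : Int :=
  match rest with
  | [] => ans
  | ch :: rest' =>
    let commonChars := PySem.Set.inter (PySem.Set.ofList (PySem.Dict.keys lm))
                                       (PySem.Set.ofList (PySem.Dict.keys rm))
    let maxCommon := commonChars.foldl
        (fun acc cch => acc + min (PySem.Dict.getD lm cch 0) (PySem.Dict.getD rm cch 0)) 0
    let ans2 := max ans maxCommon
    let maxPossible := min (cut : Int) (n - (cut : Int)) + 1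
    if ans2 ≥ maxPossible then ans2
    else
      let lm2 := if PySem.Dict.contains lm ch then lm else PySem.Dict.insert lm ch 0
      let lm3 := PySem.Dict.insert lm2 ch (PySem.Dict.getD lm2 ch 0 + 1)
      let rm2 := PySem.Dict.insert rm ch (PySem.Dict.getD rm ch 0 - 1)
      let rm3 := if PySem.Dict.getD rm2 ch 0 = 0 then PySem.Dict.erase rm2 ch else rm2
      maxLCSGoA n rest' (cut + 1) lm3 rm3 ans2

def maxLCS (s : String) : Int :=
  -- first loop: build right_map as a counter of s (with the 'if ch not in' setdefault)
  let rm := s.toList.foldl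
      (fun d ch =>
        let d2 := if PySem.Dict.contains d ch then d else PySem.Dict.insert d ch 0
        PySem.Dict.insert d2 ch (PySem.Dict.getD d2 ch 0 + 1))
      PySem.Dict.empty
  maxLCSGoA (PySem.Str.len s) s.toList 0 PySem.Dict.empty rm 0

-- ===== PORT B =====
def maxLCSGoB (rest : List Char) (lm rm : PySem.Dict Char Int) (common ans : Int) : Int :=
  match rest with
  | [] => ans
  | ch :: rest' =>
    let l := PySem.Dict.getD lm ch 0
    let r := PySem.Dict.getD rm ch 0
    let common2 := common + min (l + 1) (r - 1) - min l r
    maxLCSGoB rest' (PySem.Dict.insert lm ch (l + 1)) (PySem.Dict.insert rm ch (r - 1))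
      common2 (max ans common2)

def maxLCS_alt (s : String) : Int :=
  let rm := s.toList.foldl (fun d ch => PySem.Dict.insert d ch (PySem.Dict.getD d ch 0 + 1))
      PySem.Dict.empty
  maxLCSGoB s.toList PySem.Dict.empty rm 0 0

-- ===== PRECONDITION & SPEC =====
def Spec_maxLCS (s : String) (out : Int) : Prop := out = maxLCS_alt s
instance (s : String) (out : Int) : Decidable (Spec_maxLCS s out) := by unfold Spec_maxLCS; infer_instance

-- ===== CLAIM (what is proved, stated in full; the proofs are below) =====
def Claim_equal_maxLCS : Prop := ∀ (s : String), Dom_maxLCS s → Spec_maxLCS s (maxLCS s)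


-- ===== LEMMAS AND PROOFS =====

-- count as an Int
def cntI (l : List Char) (c : Char) : Int := (l.count c : Int)

-- the common-character score of the cut at position k
def cutC (sl : List Char) (k : Nat) : Int :=
  ∑ c ∈ sl.toFinset, min (cntI (sl.take k) c) (cntI (sl.drop k) c)

-- max of 0 and cutC 0 .. cutC (m-1)   (what A's ans holds on entering iteration m)
def cmax (sl : List Char) : Nat → Int
  | 0 => 0
  | m + 1 => max (cmax sl m) (cutC sl m)

-- max of 0 and cutC 1 .. cutC m   (what B's ans holds after m iterations)
def bans (sl : List Char) : Nat → Int
  | 0 => 0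
  | m + 1 => max (bans sl m) (cutC sl (m + 1))

theorem cntI_nonneg (l : List Char) (c : Char) : 0 ≤ cntI l c := Int.natCast_nonneg _

theorem cntI_append (a b : List Char) (c : Char) :
    cntI (a ++ b) c = cntI a c + cntI b c := by
  simp [cntI, List.count_append]

theorem cntI_eq_zero {l : List Char} {c : Char} (h : c ∉ l) : cntI l c = 0 := by
  simp [cntI, List.count_eq_zero_of_not_mem h]

theorem sum_cntI {sub sl : List Char} (h : ∀ c ∈ sub, c ∈ sl) :
    ∑ c ∈ sl.toFinset, cntI sub c = (sub.length : Int) := by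
  have hsub : sub.toFinset ⊆ sl.toFinset := by
    intro c hc; simpa using h c (by simpa using hc)
  have : ∑ c ∈ sl.toFinset, cntI sub c = ∑ c ∈ sub.toFinset, cntI sub c := by
    refine (Finset.sum_subset hsub ?_).symm
    intro c _ hc
    exact cntI_eq_zero (by simpa using hc)
  rw [this]
  have := List.sum_toFinset_count_eq_length sub
  calc ∑ c ∈ sub.toFinset, cntI sub c = ((∑ c ∈ sub.toFinset, sub.count c : Nat) : Int) := by
        push_cast [cntI]; rfl
    _ = (sub.length : Int) := by rw [this]

theorem cutC_le_left (sl : List Char) (k : Nat) : cutC sl k ≤ ((sl.take k).length : Int) := by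
  calc cutC sl k ≤ ∑ c ∈ sl.toFinset, cntI (sl.take k) c :=
        Finset.sum_le_sum (fun c _ => min_le_left _ _)
    _ = _ := sum_cntI (fun c hc => (sl.take_subset k) hc)

theorem cutC_le_right (sl : List Char) (k : Nat) : cutC sl k ≤ ((sl.drop k).length : Int) := by
  calc cutC sl k ≤ ∑ c ∈ sl.toFinset, cntI (sl.drop k) c :=
        Finset.sum_le_sum (fun c _ => min_le_right _ _)
    _ = _ := sum_cntI (fun c hc => (sl.drop_subset k) hc)

theorem cutC_zero (sl : List Char) : cutC sl 0 = 0 := by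
  apply Finset.sum_eq_zero
  intro c _
  simp [cntI]

theorem cutC_length (sl : List Char) : cutC sl sl.length = 0 := by
  apply Finset.sum_eq_zero
  intro c _
  rw [List.drop_length]
  have h0 : cntI ([] : List Char) c = 0 := by simp [cntI]
  rw [h0]
  exact min_eq_right (cntI_nonneg _ _)

-- the swapped character is the only one whose min-contribution changes at a cut step
theorem cutC_succ (sl : List Char) (k : Nat) (h : k < sl.length) :
    cutC sl (k + 1) = cutC sl k +
      (min (cntI (sl.take k) sl[k] + 1) (cntI (sl.drop k) sl[k] - 1)
        - min (cntI (sl.take k) sl[k]) (cntI (sl.drop k) sl[k])) := by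
  have htake : sl.take (k + 1) = sl.take k ++ [sl[k]] := by
    rw [List.take_add_one, List.getElem?_eq_getElem h]; rfl
  have hdrop : sl.drop k = sl[k] :: sl.drop (k + 1) := List.drop_eq_getElem_cons h
  have hmem : sl[k] ∈ sl.toFinset := by simp
  have hA : cntI (sl.take (k + 1)) sl[k] = cntI (sl.take k) sl[k] + 1 := by
    rw [htake, cntI_append]; simp [cntI]
  have hB : cntI (sl.drop (k + 1)) sl[k] = cntI (sl.drop k) sl[k] - 1 := by
    have hc1 : cntI (sl[k] :: sl.drop (k + 1)) sl[k] = cntI (sl.drop (k + 1)) sl[k] + 1 := by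
      simp only [cntI, List.count_cons_self]; push_cast; ring
    rw [hdrop, hc1]; ring
  have hpt : ∀ c ∈ sl.toFinset,
      min (cntI (sl.take (k + 1)) c) (cntI (sl.drop (k + 1)) c)
        = min (cntI (sl.take k) c) (cntI (sl.drop k) c)
          + (if c = sl[k] then
              (min (cntI (sl.take k) sl[k] + 1) (cntI (sl.drop k) sl[k] - 1)
                - min (cntI (sl.take k) sl[k]) (cntI (sl.drop k) sl[k])) else 0) := by
    intro c _
    by_cases hc : c = sl[k]
    · subst hc
      rw [hA, hB]
      simp
    · have hz : cntI [sl[k]] c = 0 := cntI_eq_zero (by simp [hc])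
      have h1 : cntI (sl.take (k + 1)) c = cntI (sl.take k) c := by
        rw [htake, cntI_append, hz]; ring
      have hz2 : cntI (sl[k] :: sl.drop (k + 1)) c = cntI (sl.drop (k + 1)) c := by
        simp only [cntI, List.count_cons]
        simp [Ne.symm hc]
      have h2 : cntI (sl.drop (k + 1)) c = cntI (sl.drop k) c := by
        rw [hdrop, hz2]
      rw [h1, h2]
      simp [hc]
  rw [cutC, Finset.sum_congr rfl hpt, Finset.sum_add_distrib, Finset.sum_ite_eq' sl.toFinset]
  rw [if_pos hmem]
  rfl

theorem cmax_nonneg (sl : List Char) (m : Nat) : 0 ≤ cmax sl m := by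
  induction m with
  | zero => simp [cmax]
  | succ m ih => simp [cmax]; left; exact ih

theorem cutC_le_cmax (sl : List Char) {k m : Nat} (h : k < m) : cutC sl k ≤ cmax sl m := by
  induction m with
  | zero => omega
  | succ m ih =>
    rcases Nat.lt_succ_iff_lt_or_eq.mp h with h' | h'
    · exact le_trans (ih h') (le_max_left _ _)
    · subst h'; exact le_max_right _ _

theorem cmax_le (sl : List Char) {m : Nat} {x : Int} (h0 : 0 ≤ x)
    (h : ∀ k, k < m → cutC sl k ≤ x) : cmax sl m ≤ x := by
  induction m with
  | zero => simpa [cmax]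
  | succ m ih =>
    simp only [cmax, max_le_iff]
    exact ⟨ih (fun k hk => h k (by omega)), h m (by omega)⟩

theorem cmax_mono (sl : List Char) {m m' : Nat} (h : m ≤ m') : cmax sl m ≤ cmax sl m' := by
  apply cmax_le sl (cmax_nonneg sl m')
  intro k hk
  exact cutC_le_cmax sl (by omega)

theorem bans_eq (sl : List Char) (m : Nat) : bans sl m = max (cmax sl m) (cutC sl m) := by
  induction m with
  | zero => simp [bans, cmax, cutC_zero]
  | succ m ih =>
    rw [bans, cmax, ih, max_assoc]

theorem bans_length (sl : List Char) : bans sl sl.length = cmax sl sl.length := by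
  rw [bans_eq, cutC_length]
  exact max_eq_left (cmax_nonneg sl _)

-- A's early break is sound: once ans ≥ min(cut, n-cut)+1 no later cut can beat ans
theorem break_sound (sl : List Char) (cut : Nat) (hcut : cut < sl.length)
    (hbr : cmax sl (cut + 1) ≥ min (cut : Int) ((sl.length : Int) - cut) + 1) :
    cmax sl sl.length = cmax sl (cut + 1) := by
  have hub : cmax sl (cut + 1) ≤ (cut : Int) := by
    apply cmax_le sl (by exact_mod_cast Nat.zero_le cut)
    intro k hk
    calc cutC sl k ≤ ((sl.take k).length : Int) := cutC_le_left sl k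
      _ ≤ (cut : Int) := by simp [List.length_take]; omega
  have hcase : (sl.length : Int) - cut ≤ (cut : Int) := by
    rcases le_or_gt ((sl.length : Int) - cut) (cut : Int) with h | h
    · exact h
    · exfalso
      have : min (cut : Int) ((sl.length : Int) - cut) = cut := min_eq_left (by omega)
      omega
  refine le_antisymm ?_ (cmax_mono sl (by omega))
  apply cmax_le sl (cmax_nonneg sl _)
  intro k hk
  by_cases hkc : k < cut + 1
  · exact cutC_le_cmax sl hkc
  · have : cutC sl k ≤ ((sl.drop k).length : Int) := cutC_le_right sl k
    have hmin : min (cut : Int) ((sl.length : Int) - cut) = (sl.length : Int) - cut :=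
      min_eq_right hcase
    simp [List.length_drop] at this
    omega

-- ---- Dict.erase lemmas (PySem provides none) ----
theorem getD_erase_self (d : PySem.Dict Char Int) (k : Char) :
    (d.erase k).getD k 0 = 0 := by
  have h : List.find? (fun p => p.1 == k) ((d.erase k).items) = none := by
    rw [List.find?_eq_none]
    intro p hp
    simp [PySem.Dict.erase] at hp
    simp [hp.2]
  simp [PySem.Dict.getD, PySem.Dict.get?, h]

theorem getD_erase_of_ne (d : PySem.Dict Char Int) (k c : Char) (hne : c ≠ k) :
    (d.erase k).getD c 0 = d.getD c 0 := by
  rcases d with ⟨items⟩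
  simp only [PySem.Dict.getD, PySem.Dict.get?, PySem.Dict.erase]
  induction items with
  | nil => rfl
  | cons p rest ih =>
    rw [List.filter_cons]
    by_cases hk : p.1 = k
    · rw [if_neg (by simp [hk]), List.find?_cons_of_neg (by simp [hk, Ne.symm hne])]
      exact ih
    · rw [if_pos (by simp [hk])]
      by_cases hc : p.1 = c
      · rw [List.find?_cons_of_pos (by simp [hc]), List.find?_cons_of_pos (by simp [hc])]
      · rw [List.find?_cons_of_neg (by simp [hc]), List.find?_cons_of_neg (by simp [hc])]
        exact ih

theorem mem_keys_erase (d : PySem.Dict Char Int) (k c : Char) :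
    c ∈ (d.erase k).keys ↔ c ∈ d.keys ∧ c ≠ k := by
  simp only [PySem.Dict.keys, PySem.Dict.erase, List.mem_map, List.mem_filter]
  constructor
  · rintro ⟨p, ⟨hp, hk⟩, rfl⟩
    exact ⟨⟨p, hp, rfl⟩, by simpa using hk⟩
  · rintro ⟨⟨p, hp, rfl⟩, hk⟩
    exact ⟨p, ⟨hp, by simpa using hk⟩, rfl⟩

theorem nodup_keys_erase (d : PySem.Dict Char Int) (k : Char) (h : d.keys.Nodup) :
    (d.erase k).keys.Nodup := by
  have hsub : (d.erase k).items.Sublist d.items := List.filter_sublist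
  exact (hsub.map Prod.fst).nodup h

-- ---- A's right_map build step is the plain counter step ----
theorem stepA_eq (d : PySem.Dict Char Int) (ch : Char) :
    (PySem.Dict.insert (if PySem.Dict.contains d ch then d else PySem.Dict.insert d ch 0) ch
      (PySem.Dict.getD (if PySem.Dict.contains d ch then d else PySem.Dict.insert d ch 0) ch 0 + 1))
      = PySem.Dict.insert d ch (PySem.Dict.getD d ch 0 + 1) := by
  by_cases h : PySem.Dict.contains d ch = true
  · simp [h]
  · rw [if_neg (by simp [h]), PySem.Dict.getD_insert_self, PySem.Dict.insert_insert_self,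
      PySem.Dict.getD_of_not_contains d 0 (by simpa using h)]

-- ---- A's inner sum over the key-set intersection equals cutC ----
theorem common_sum (pre rest sl : List Char) (lm rm : PySem.Dict Char Int)
    (hsl : sl = pre ++ rest)
    (hlg : ∀ c, PySem.Dict.getD lm c 0 = cntI pre c)
    (hlk : ∀ c, c ∈ PySem.Dict.keys lm ↔ c ∈ pre)
    (_hln : (PySem.Dict.keys lm).Nodup)
    (hrg : ∀ c, PySem.Dict.getD rm c 0 = cntI rest c)
    (hrk : ∀ c, c ∈ PySem.Dict.keys rm ↔ c ∈ rest)
    (_hrn : (PySem.Dict.keys rm).Nodup) :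
    (PySem.Set.inter (PySem.Set.ofList (PySem.Dict.keys lm)) (PySem.Set.ofList (PySem.Dict.keys rm))).foldl
        (fun acc cch => acc + min (PySem.Dict.getD lm cch 0) (PySem.Dict.getD rm cch 0)) 0
      = cutC sl pre.length := by
  set L := PySem.Set.inter (PySem.Set.ofList (PySem.Dict.keys lm)) (PySem.Set.ofList (PySem.Dict.keys rm)) with hL
  have hnod : L.Nodup := PySem.Set.nodup_inter _ _ (PySem.Set.nodup_ofList _)
  have hmemL : ∀ c, c ∈ L ↔ c ∈ pre ∧ c ∈ rest := by
    intro c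
    rw [hL, PySem.Set.mem_inter, PySem.Set.mem_ofList, PySem.Set.mem_ofList, hlk c, hrk c]
  rw [PySem.List.foldl_add, zero_add, ← List.sum_toFinset _ hnod]
  have hcongr : ∑ c ∈ L.toFinset, min (PySem.Dict.getD lm c 0) (PySem.Dict.getD rm c 0)
      = ∑ c ∈ L.toFinset, min (cntI pre c) (cntI rest c) :=
    Finset.sum_congr rfl (fun c _ => by rw [hlg c, hrg c])
  rw [hcongr]
  have hsubset : L.toFinset ⊆ sl.toFinset := by
    intro c hc
    rw [List.mem_toFinset] at hc
    rw [List.mem_toFinset, hsl]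
    exact List.mem_append_left _ ((hmemL c).mp hc).1
  have hzero : ∀ c ∈ sl.toFinset, c ∉ L.toFinset → min (cntI pre c) (cntI rest c) = 0 := by
    intro c _ hc
    rw [List.mem_toFinset, hmemL c] at hc
    rcases Decidable.not_and_iff_not_or_not.mp hc with h | h
    · rw [cntI_eq_zero h]
      exact min_eq_left (cntI_nonneg _ _)
    · rw [cntI_eq_zero h]
      exact min_eq_right (cntI_nonneg _ _)
  rw [Finset.sum_subset hsubset (fun c hc hcL => hzero c hc hcL)]
  rw [cutC, hsl, List.take_left, List.drop_left]

theorem cntI_cons (ch c : Char) (l : List Char) :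
    cntI (ch :: l) c = cntI l c + (if c = ch then 1 else 0) := by
  by_cases h : c = ch
  · subst h; simp [cntI, List.count_cons_self]
  · simp [cntI, h, Ne.symm h]

theorem cntI_concat (pre : List Char) (ch c : Char) :
    cntI (pre ++ [ch]) c = cntI pre c + (if c = ch then 1 else 0) := by
  rw [cntI_append]
  by_cases h : c = ch
  · subst h; simp [cntI]
  · have hz : cntI [ch] c = 0 := cntI_eq_zero (by simp [h])
    rw [hz, if_neg h, add_zero]

-- ---- A's main loop computes cmax sl sl.length ----
theorem A_loop (sl : List Char) (rest : List Char) : ∀ (pre : List Char)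
    (lm rm : PySem.Dict Char Int) (ans : Int),
    sl = pre ++ rest →
    (∀ c, PySem.Dict.getD lm c 0 = cntI pre c) →
    (∀ c, c ∈ PySem.Dict.keys lm ↔ c ∈ pre) →
    (PySem.Dict.keys lm).Nodup →
    (∀ c, PySem.Dict.getD rm c 0 = cntI rest c) →
    (∀ c, c ∈ PySem.Dict.keys rm ↔ c ∈ rest) →
    (PySem.Dict.keys rm).Nodup →
    ans = cmax sl pre.length →
    maxLCSGoA (sl.length : Int) rest pre.length lm rm ans = cmax sl sl.length := by
  induction rest with
  | nil =>
    intro pre lm rm ans hsl _ _ _ _ _ _ hans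
    have : pre = sl := by rw [hsl, List.append_nil]
    rw [maxLCSGoA, hans, this]
  | cons ch rest' ih =>
    intro pre lm rm ans hsl hlg hlk hln hrg hrk hrn hans
    rw [maxLCSGoA]
    simp only []
    have hcommon := common_sum pre (ch :: rest') sl lm rm hsl hlg hlk hln hrg hrk hrn
    rw [hcommon]
    have hlen : pre.length < sl.length := by
      rw [hsl]; simp
    have hans2 : max ans (cutC sl pre.length) = cmax sl (pre.length + 1) := by
      rw [hans]; rfl
    rw [hans2]
    by_cases hbr : cmax sl (pre.length + 1) ≥ min (pre.length : Int) ((sl.length : Int) - pre.length) + 1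
    · rw [if_pos hbr]
      exact (break_sound sl pre.length hlen hbr).symm
    · rw [if_neg hbr]
      -- recurse with pre ++ [ch]
      have hsl' : sl = (pre ++ [ch]) ++ rest' := by rw [hsl]; simp
      have hlg2 : ∀ c, PySem.Dict.getD
          (if PySem.Dict.contains lm ch then lm else PySem.Dict.insert lm ch 0) c 0
          = cntI pre c := by
        intro c
        by_cases h : PySem.Dict.contains lm ch = true
        · rw [if_pos h]; exact hlg c
        · rw [if_neg (by simp [h])]
          by_cases hc : c = ch
          · subst hc
            rw [PySem.Dict.getD_insert_self, ← hlg c,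
              PySem.Dict.getD_of_not_contains lm 0 (by simpa using h)]
          · rw [PySem.Dict.getD_insert lm ch c, if_neg hc]
            exact hlg c
      have hlk2 : ∀ c, c ∈ PySem.Dict.keys
          (if PySem.Dict.contains lm ch then lm else PySem.Dict.insert lm ch 0)
          ↔ (c = ch ∨ c ∈ pre) := by
        intro c
        by_cases h : PySem.Dict.contains lm ch = true
        · rw [if_pos h, hlk c]
          constructor
          · exact Or.inr
          · rintro (rfl | hc)
            · exact (hlk c).mp ((PySem.Dict.contains_iff_mem_keys lm c).mp h)
            · exact hc
        · rw [if_neg (by simp [h]), PySem.Dict.mem_keys_insert, hlk c]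
      have hln2 : (PySem.Dict.keys
          (if PySem.Dict.contains lm ch then lm else PySem.Dict.insert lm ch 0)).Nodup := by
        by_cases h : PySem.Dict.contains lm ch = true
        · rw [if_pos h]; exact hln
        · rw [if_neg (by simp [h])]; exact PySem.Dict.nodup_keys_insert lm ch 0 hln
      refine ?_  -- assemble the recursive call
      set lm2 := if PySem.Dict.contains lm ch then lm else PySem.Dict.insert lm ch 0 with hlm2
      have hrec := ih (pre ++ [ch])
        (PySem.Dict.insert lm2 ch (PySem.Dict.getD lm2 ch 0 + 1))
        (if PySem.Dict.getD (PySem.Dict.insert rm ch (PySem.Dict.getD rm ch 0 - 1)) ch 0 = 0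
          then PySem.Dict.erase (PySem.Dict.insert rm ch (PySem.Dict.getD rm ch 0 - 1)) ch
          else PySem.Dict.insert rm ch (PySem.Dict.getD rm ch 0 - 1))
        (cmax sl (pre.length + 1)) hsl' ?_ ?_ ?_ ?_ ?_ ?_ ?_
      · rw [← hrec]
        simp [List.length_append]
      · -- lm getD invariant
        intro c
        rw [cntI_concat, PySem.Dict.getD_insert]
        by_cases hc : c = ch
        · subst hc; rw [if_pos rfl, hlg2 c, if_pos rfl]
        · rw [if_neg hc, hlg2 c, if_neg hc, add_zero]
      · -- lm keys invariant
        intro c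
        rw [PySem.Dict.mem_keys_insert, hlk2 c]
        simp [or_comm]
      · exact PySem.Dict.nodup_keys_insert _ ch _ hln2
      · -- rm getD invariant
        intro c
        have hrm2 : ∀ c', PySem.Dict.getD (PySem.Dict.insert rm ch (PySem.Dict.getD rm ch 0 - 1)) c' 0
            = cntI rest' c' := by
          intro c'
          rw [PySem.Dict.getD_insert]
          by_cases hc : c' = ch
          · subst hc
            rw [if_pos rfl, hrg c', cntI_cons]
            simp
          · rw [if_neg hc, hrg c', cntI_cons]
            simp [hc]
        by_cases hz : PySem.Dict.getD (PySem.Dict.insert rm ch (PySem.Dict.getD rm ch 0 - 1)) ch 0 = 0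
        · rw [if_pos hz]
          by_cases hc : c = ch
          · subst hc
            rw [getD_erase_self, ← hrm2 c, hz]
          · rw [getD_erase_of_ne _ _ _ hc]
            exact hrm2 c
        · rw [if_neg hz]
          exact hrm2 c
      · -- rm keys invariant
        intro c
        have hkey2 : ∀ c', c' ∈ PySem.Dict.keys (PySem.Dict.insert rm ch (PySem.Dict.getD rm ch 0 - 1))
            ↔ (c' = ch ∨ c' ∈ rest') := by
          intro c'
          rw [PySem.Dict.mem_keys_insert, hrk c']
          simp
        by_cases hz : PySem.Dict.getD (PySem.Dict.insert rm ch (PySem.Dict.getD rm ch 0 - 1)) ch 0 = 0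
        · rw [if_pos hz]
          have hchz : ch ∉ rest' := by
            intro hmem
            rw [PySem.Dict.getD_insert_self, hrg ch, cntI_cons] at hz
            have : 0 < cntI rest' ch := by
              unfold cntI
              exact_mod_cast List.count_pos_iff.mpr hmem
            simp at hz
            omega
          rw [mem_keys_erase, hkey2 c]
          constructor
          · rintro ⟨rfl | hc, hne⟩
            · exact absurd rfl hne
            · exact hc
          · intro hc
            exact ⟨Or.inr hc, fun h => hchz (h ▸ hc)⟩
        · rw [if_neg hz]
          rw [hkey2 c]
          have hchm : ch ∈ rest' := by
            by_contra hmem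
            apply hz
            rw [PySem.Dict.getD_insert_self, hrg ch, cntI_cons, cntI_eq_zero hmem]
            simp
          constructor
          · rintro (rfl | hc)
            · exact hchm
            · exact hc
          · exact Or.inr
      · -- rm keys nodup
        by_cases hz : PySem.Dict.getD (PySem.Dict.insert rm ch (PySem.Dict.getD rm ch 0 - 1)) ch 0 = 0
        · rw [if_pos hz]
          exact nodup_keys_erase _ ch (PySem.Dict.nodup_keys_insert _ ch _ hrn)
        · rw [if_neg hz]
          exact PySem.Dict.nodup_keys_insert _ ch _ hrn
      · simp [List.length_append]

-- ---- B's single pass computes bans sl sl.length ----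
theorem B_loop (sl : List Char) (rest : List Char) : ∀ (pre : List Char)
    (lm rm : PySem.Dict Char Int) (common ans : Int),
    sl = pre ++ rest →
    (∀ c, PySem.Dict.getD lm c 0 = cntI pre c) →
    (∀ c, PySem.Dict.getD rm c 0 = cntI sl c - cntI pre c) →
    common = cutC sl pre.length →
    ans = bans sl pre.length →
    maxLCSGoB rest lm rm common ans = bans sl sl.length := by
  induction rest with
  | nil =>
    intro pre lm rm common ans hsl _ _ _ hans
    have : pre = sl := by rw [hsl, List.append_nil]
    rw [maxLCSGoB, hans, this]
  | cons ch rest' ih =>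
    intro pre lm rm common ans hsl hlg hrg hcom hans
    have hlen : pre.length < sl.length := by rw [hsl]; simp
    have hdropk : sl.drop pre.length = ch :: rest' := by rw [hsl, List.drop_left]
    have hget : sl[pre.length]'hlen = ch := by
      have h1 := List.drop_eq_getElem_cons hlen
      rw [hdropk] at h1
      exact (List.cons.injEq _ _ _ _ ▸ h1.symm).1
    have htakek : sl.take pre.length = pre := by rw [hsl, List.take_left]
    have hrest : cntI (ch :: rest') ch = cntI sl ch - cntI pre ch := by
      rw [hsl, cntI_append]; ring
    simp only [maxLCSGoB]
    have hcom2 : common + min (PySem.Dict.getD lm ch 0 + 1) (PySem.Dict.getD rm ch 0 - 1)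
        - min (PySem.Dict.getD lm ch 0) (PySem.Dict.getD rm ch 0)
        = cutC sl (pre.length + 1) := by
      rw [hcom, hlg ch, hrg ch, ← hrest, cutC_succ sl pre.length hlen, hget, htakek, hdropk]
      ring
    rw [hcom2]
    apply ih (pre ++ [ch]) _ _ _ _ (by rw [hsl]; simp) ?_ ?_ ?_ ?_
    · intro c
      rw [PySem.Dict.getD_insert, cntI_concat]
      by_cases hc : c = ch
      · subst hc; rw [if_pos rfl, if_pos rfl, hlg c]
      · rw [if_neg hc, if_neg hc, hlg c, add_zero]
    · intro c
      rw [PySem.Dict.getD_insert, cntI_concat]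
      by_cases hc : c = ch
      · subst hc; rw [if_pos rfl, if_pos rfl, hrg c]; ring
      · rw [if_neg hc, if_neg hc, hrg c, add_zero]
    · simp [List.length_append]
    · rw [hans]
      simp [List.length_append, bans]

theorem maxLCS_spec : Claim_equal_maxLCS := by
  unfold Claim_equal_maxLCS
  intro s _
  unfold Spec_maxLCS
  set sl := s.toList with hsl
  -- evaluate A
  have hA : maxLCS s = cmax sl sl.length := by
    rw [maxLCS]
    simp only [stepA_eq]
    have hlen : PySem.Str.len s = (sl.length : Int) := by
      simp [PySem.Str.len, hsl]
    rw [hlen]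
    apply A_loop sl sl [] PySem.Dict.empty _ 0 rfl
    · intro c; simp [cntI]
    · intro c; simp [PySem.Dict.keys_empty]
    · simp [PySem.Dict.keys_empty]
    · intro c
      rw [PySem.Dict.getD_foldl_insert_add_one]
      simp [cntI, hsl]
    · intro c
      rw [PySem.Dict.keys_foldl_insert]
      simp [PySem.Dict.keys_empty, PySem.Set.mem_ofList, PySem.Set.update_nil_left, hsl]
    · exact PySem.Dict.nodup_keys_foldl_insert _ _ _ (by simp [PySem.Dict.keys_empty])
    · rfl
  have hB : maxLCS_alt s = bans sl sl.length := by
    rw [maxLCS_alt]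
    apply B_loop sl sl [] PySem.Dict.empty _ 0 0 rfl
    · intro c; simp [cntI]
    · intro c
      rw [PySem.Dict.getD_foldl_insert_add_one]
      simp [cntI, hsl]
    · simp [cutC_zero]
    · rfl
  rw [hA, hB, bans_length]
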